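-- pv_equiv track=rewrite | github.com/LionTera/verification_python | tests/bpf_env/packet_generator.py | _normalize_randomize_fields
-- ===== SOURCE A (Python) =====
-- from typing import Iterable
--
-- SUPPORTED_RANDOMIZE_FIELDS = {
--     "length",
--     "payload_len",
--     "payload_bytes",
--     "ttl",
--     "dscp_ecn",
--     "src_ip",
--     "dst_ip",
--     "identification",
--     "flags_fragment",
--     "src_port",
--     "seq",
--     "ack",
--     "tcp_flags",
--     "tcp_window",
--     "ip_protocol",
-- }
--
-- def _normalize_randomize_fields(raw_fields: Iterable[str] | str) -> tuple[str, ...]: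
--     """Normalize the randomization field list into a validated tuple."""
--     if isinstance(raw_fields, str):
--         pieces = [piece.strip().lower() for piece in raw_fields.split(",")]
--     else:
--         pieces = [str(piece).strip().lower() for piece in raw_fields]
--     normalized = tuple(dict.fromkeys(piece for piece in pieces if piece))
--     unsupported = sorted(set(normalized) - SUPPORTED_RANDOMIZE_FIELDS)
--     if unsupported:
--         raise ValueError(
--             "Unsupported randomize fields: "
--             + ", ".join(unsupported)
--             + ". Supported fields are: "
--             + ", ".join(sorted(SUPPORTED_RANDOMIZE_FIELDS))
--         )
--     return normalized
-- ===== SOURCE B (Python) =====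
-- from typing import Iterable
--
-- SUPPORTED_RANDOMIZE_FIELDS = {
--     "length",
--     "payload_len",
--     "payload_bytes",
--     "ttl",
--     "dscp_ecn",
--     "src_ip",
--     "dst_ip",
--     "identification",
--     "flags_fragment",
--     "src_port",
--     "seq",
--     "ack",
--     "tcp_flags",
--     "tcp_window",
--     "ip_protocol",
-- }
--
-- def _normalize_randomize_fields(raw_fields):
--     """Normalize the randomization field list into a validated tuple.
--
--     Back-to-front algorithm: walk the tokens in REVERSE order and keep the
--     first-occurrence order by prepending each token while purging any later
--     duplicate of it from the partial result; no seen-set, no dict.fromkeys.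
--     """
--     tokens = raw_fields.split(",") if isinstance(raw_fields, str) else [str(p) for p in raw_fields]
--     result = []
--     for piece in reversed(tokens):
--         tok = piece.strip().lower()
--         if tok:
--             result = [tok] + [t for t in result if t != tok]
--     unsupported = sorted({t for t in result if t not in SUPPORTED_RANDOMIZE_FIELDS})
--     if unsupported:
--         raise ValueError(
--             "Unsupported randomize fields: "
--             + ", ".join(unsupported)
--             + ". Supported fields are: "
--             + ", ".join(sorted(SUPPORTED_RANDOMIZE_FIELDS))
--         )
--     return tuple(result)
-- ===== Notes on version B (the rewrite author's own statement) =====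
-- stated objective: alternative
-- what changed: Replaces A's forward pipeline (comprehension, dict.fromkeys dedup, set-difference) with a back-to-front scan that prepends each token and purges its later duplicates from the partial result, so first-occurrence order emerges with no dict/seen-set at all.
import Mathlib
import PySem

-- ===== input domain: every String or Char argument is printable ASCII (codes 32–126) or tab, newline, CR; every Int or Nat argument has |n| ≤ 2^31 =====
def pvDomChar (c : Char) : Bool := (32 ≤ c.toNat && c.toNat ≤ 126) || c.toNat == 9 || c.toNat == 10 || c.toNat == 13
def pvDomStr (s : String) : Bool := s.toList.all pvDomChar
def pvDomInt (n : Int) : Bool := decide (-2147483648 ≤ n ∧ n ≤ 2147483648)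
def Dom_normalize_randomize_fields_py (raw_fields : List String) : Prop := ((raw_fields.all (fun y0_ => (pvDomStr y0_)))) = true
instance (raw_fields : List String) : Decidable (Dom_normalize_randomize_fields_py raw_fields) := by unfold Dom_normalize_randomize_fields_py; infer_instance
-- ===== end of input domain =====

-- B replaces A's forward pipeline (map, dict.fromkeys dedup, set-difference) with a back-to-front
-- scan that prepends each token and purges its later duplicates from the partial result; the
-- equality of the RETURN value is proved on Pre_ (the inputs on which the Python raises no ValueError).

-- ===== PORT A =====
-- SUPPORTED_RANDOMIZE_FIELDS (a Python set; only membership and, in the error message, its sorted form are used)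
def pvSupported : PySem.Set String :=
  PySem.Set.ofList ["length", "payload_len", "payload_bytes", "ttl", "dscp_ecn", "src_ip",
    "dst_ip", "identification", "flags_fragment", "src_port", "seq", "ack", "tcp_flags",
    "tcp_window", "ip_protocol"]

-- piece.strip().lower()
def pvTok (piece : String) : String := PySem.Str.lower (PySem.Str.strip piece)

def normalize_randomize_fields_py (raw_fields : List String) : List String :=
  -- raw_fields is a list of strings here, so the isinstance-str branch is not taken and
  -- str(piece) is the identity
  let pieces := raw_fields.map (fun piece => pvTok piece)
  let normalized := PySem.List.dedup (pieces.filter (fun piece => piece ≠ ""))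
  let unsupported :=
    PySem.List.sorted ((PySem.Set.ofList normalized).filter (fun p => !pvSupported.contains p)) id
  if unsupported ≠ [] then []  -- Python raises ValueError here; Pre_ excludes these inputs
  else normalized

-- ===== PORT B =====
-- the body of B's 'for piece in reversed(tokens)' loop
def pvPurgeStep (res : List String) (piece : String) : List String :=
  let tok := pvTok piece
  if tok = "" then res else tok :: res.filter (fun t => t ≠ tok)

def normalize_randomize_fields_py_alt (raw_fields : List String) : List String :=
  let result := raw_fields.reverse.foldl pvPurgeStep []
  let unsupported :=
    PySem.List.sorted (PySem.Set.ofList (result.filter (fun t => !pvSupported.contains t))) id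
  if unsupported ≠ [] then []  -- Python raises ValueError here; Pre_ excludes these inputs
  else result

-- ===== PRECONDITION & SPEC =====
-- Pre_: exactly the inputs on which A returns (no ValueError): every normalized token is
-- empty or a supported field name.
def Pre_normalize_randomize_fields_py (raw_fields : List String) : Prop :=
  ∀ s ∈ raw_fields, pvTok s = "" ∨ pvSupported.contains (pvTok s) = true
instance (raw_fields : List String) : Decidable (Pre_normalize_randomize_fields_py raw_fields) := by
  unfold Pre_normalize_randomize_fields_py; infer_instance

def pvWitness_normalize_randomize_fields_py : List String := ["ttl", " SRC_IP ", "", "ttl", "Seq"]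

def Spec_normalize_randomize_fields_py (raw_fields : List String) (out : List String) : Prop := out = normalize_randomize_fields_py_alt raw_fields
instance (raw_fields : List String) (out : List String) : Decidable (Spec_normalize_randomize_fields_py raw_fields out) := by unfold Spec_normalize_randomize_fields_py; infer_instance

-- ===== CLAIM (what is proved, stated in full; the proofs are below) =====
def Claim_equal_normalize_randomize_fields_py : Prop := ∀ (raw_fields : List String), Dom_normalize_randomize_fields_py raw_fields → Pre_normalize_randomize_fields_py raw_fields → Spec_normalize_randomize_fields_py raw_fields (normalize_randomize_fields_py raw_fields)

-- ===== LEMMAS AND PROOFS =====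

-- foldl Set.add with x already at the head: x stays in front and x-duplicates are skipped
theorem pv_add_cons (l : List String) (x : String) (s : List String) :
    List.foldl PySem.Set.add (x :: s) l =
      x :: List.foldl PySem.Set.add s (l.filter (fun y => y ≠ x)) := by
  induction l generalizing s with
  | nil => rfl
  | cons y l ih =>
    by_cases hyx : y = x
    · subst hyx
      have h0 : PySem.Set.add (y :: s) y = y :: s := by simp [PySem.Set.add]
      rw [List.foldl_cons, h0, ih, List.filter_cons_of_neg (by simp)]
    · have h1 : PySem.Set.add (x :: s) y = x :: PySem.Set.add s y := by
        by_cases hys : y ∈ s <;> simp [PySem.Set.add, hys, hyx]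
      conv_rhs => rw [List.filter_cons_of_pos (by simp [hyx]), List.foldl_cons]
      rw [List.foldl_cons, h1, ih]

-- dedup of a cons, with the duplicates of the head filtered from the TAIL argument
theorem pv_dedup_cons (x : String) (l : List String) :
    PySem.List.dedup (x :: l) = x :: PySem.List.dedup (l.filter (fun y => y ≠ x)) := by
  simp only [PySem.List.dedup, PySem.Set.ofList, List.foldl_cons]
  have h0 : PySem.Set.empty.add x = x :: PySem.Set.empty := by
    simp [PySem.Set.add, PySem.Set.empty]
  rw [h0, pv_add_cons]

-- first-occurrence dedup commutes with filtering
theorem pv_dedup_filter (l : List String) (p : String → Bool) :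
    PySem.List.dedup (l.filter p) = (PySem.List.dedup l).filter p := by
  induction l generalizing p with
  | nil => rfl
  | cons x l ih =>
    by_cases hp : p x = true
    · rw [List.filter_cons_of_pos hp, pv_dedup_cons, pv_dedup_cons, List.filter_filter, ih,
        List.filter_cons_of_pos hp, ih, List.filter_filter]
      congr 1
      apply List.filter_congr
      intro y _
      by_cases hyx : y = x <;> simp [hyx]
    · rw [List.filter_cons_of_neg hp, pv_dedup_cons, ih, ih, List.filter_cons_of_neg hp,
        List.filter_filter]
      apply List.filter_congr
      intro y _
      have hpx : p x = false := by simpa using hp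
      by_cases hyx : y = x
      · subst hyx; simp [hpx]
      · simp [hyx]

-- B's reversed loop computes exactly A's dedup of the nonempty normalized tokens
theorem pv_loop_eq_dedup (raw_fields : List String) :
    raw_fields.reverse.foldl pvPurgeStep [] =
      PySem.List.dedup ((raw_fields.map (fun piece => pvTok piece)).filter
        (fun piece => piece ≠ "")) := by
  rw [← List.foldr_eq_foldl_reverse]
  induction raw_fields with
  | nil => rfl
  | cons x l ih =>
    rw [List.foldr_cons, ih]
    by_cases hx : pvTok x = ""
    · rw [List.map_cons, List.filter_cons_of_neg (by simp [hx])]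
      simp [pvPurgeStep, hx]
    · rw [List.map_cons, List.filter_cons_of_pos (by simp [hx]), pv_dedup_cons]
      simp only [pvPurgeStep, if_neg hx]
      exact congrArg _ (pv_dedup_filter _ _).symm

-- Under Pre_, the unsupported tokens among the deduped result are none.
theorem pv_unsupported_nil (raw_fields : List String)
    (hpre : Pre_normalize_randomize_fields_py raw_fields) :
    ((PySem.List.dedup ((raw_fields.map (fun piece => pvTok piece)).filter
        (fun piece => piece ≠ ""))).filter (fun p => !pvSupported.contains p)) = [] := by
  rw [List.filter_eq_nil_iff]
  intro p hp
  have hp' : p ∈ (raw_fields.map (fun piece => pvTok piece)).filter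
      (fun piece => piece ≠ "") := (PySem.List.mem_dedup _ _).mp hp
  rcases List.mem_filter.mp hp' with ⟨hmem, hne⟩
  rcases List.mem_map.mp hmem with ⟨s, hs, rfl⟩
  rcases hpre s hs with he | hsup
  · simp [he] at hne
  · simpa using hsup

-- ===== VERDICT (by name: the statement is the Claim_ definition above) =====
theorem normalize_randomize_fields_py_spec : Claim_equal_normalize_randomize_fields_py := by
  intro raw_fields _ hpre
  unfold Spec_normalize_randomize_fields_py
  unfold normalize_randomize_fields_py normalize_randomize_fields_py_alt
  have hnil := pv_unsupported_nil raw_fields hpre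
  simp only [pv_loop_eq_dedup raw_fields, PySem.List.dedup_eq_ofList] at hnil ⊢
  rw [PySem.Set.ofList_ofList, hnil]
  simp [PySem.List.sorted, PySem.Set.ofList]
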